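-- pv_equiv track=rewrite | github.com/jiahe0510/Speech-Tagging-HMM | Readfile.py | my_tokenize
-- ===== SOURCE A (Python) =====
-- def my_tokenize(line):
--     array = []
--     start = 0
--     end = 0
--     length = len(line)
--     while end < length:
--         if line[end] != " ":
--             end += 1
--         else:
--             string = line[start:end]
--             array.append(string)
--             start = end + 1
--             end += 1
--
--     return array
-- ===== SOURCE B (Python) =====
-- def my_tokenize(line):
--     # pass 1: table of all space positions; pass 2: cut slices between them.
--     # The segment after the last space is never emitted (matches the task).
--     positions = [i for i, ch in enumerate(line) if ch == " "]
--     out = []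
--     start = 0
--     for p in positions:
--         out.append(line[start:p])
--         start = p + 1
--     return out
-- ===== Notes on version B (the rewrite author's own statement) =====
-- stated objective: alternative
-- what changed: B first builds a table of all space positions with enumerate, then a second pass cuts the slices between consecutive positions, instead of A's single interleaved index scan with mutable start/end state.
import Mathlib
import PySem

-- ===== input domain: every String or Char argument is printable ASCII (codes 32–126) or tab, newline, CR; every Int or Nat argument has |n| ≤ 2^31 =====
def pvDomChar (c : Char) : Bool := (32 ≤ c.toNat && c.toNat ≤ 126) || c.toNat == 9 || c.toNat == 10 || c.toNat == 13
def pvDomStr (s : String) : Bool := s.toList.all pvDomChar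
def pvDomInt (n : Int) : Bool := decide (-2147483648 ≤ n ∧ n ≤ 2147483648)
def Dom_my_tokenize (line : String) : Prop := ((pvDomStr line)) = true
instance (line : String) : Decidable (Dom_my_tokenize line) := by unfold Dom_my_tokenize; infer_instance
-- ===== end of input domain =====

-- B cuts the line at a precomputed table of space positions instead of A's interleaved scan; return values proved equal.

-- ===== PORT A =====
-- A's while loop: index scan with mutable array/start/end.  The slice line[start:end]
-- always has 0 ≤ start ≤ end ≤ len (start only ever becomes end+1 right before end+1),
-- so it is exactly (drop start).take (end - start).
def myTokenizeLoop (cs : List Char) (array : List String) (start e : Nat) : List String :=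
  if e < cs.length then
    if cs.getD e ' ' ≠ ' ' then
      myTokenizeLoop cs array start (e + 1)
    else
      myTokenizeLoop cs (array ++ [String.ofList ((cs.drop start).take (e - start))]) (e + 1) (e + 1)
  else array
termination_by cs.length - e

def my_tokenize (line : String) : List String :=
  myTokenizeLoop line.toList [] 0 0

-- ===== PORT B =====
-- Source B: positions = [i for i, ch in enumerate(line) if ch == " "]; then fold cutting slices.
-- The slice line[start:p] has 0 ≤ start ≤ p ≤ len (positions are increasing enumerate
-- indices), so it is exactly (drop start).take (p - start).
def my_tokenize_alt (line : String) : List String :=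
  let cs := line.toList
  let positions := ((PySem.List.enumerate cs).filter (fun q => q.2 == ' ')).map (·.1)
  (positions.foldl
    (fun (acc : List String × Int) p =>
      (acc.1 ++ [String.ofList ((cs.drop acc.2.toNat).take (p - acc.2).toNat)], p + 1))
    ([], 0)).1

-- ===== PRECONDITION & SPEC =====
def Spec_my_tokenize (line : String) (out : List String) : Prop := out = my_tokenize_alt line
instance (line : String) (out : List String) : Decidable (Spec_my_tokenize line out) := by unfold Spec_my_tokenize; infer_instance

-- ===== CLAIM (what is proved, stated in full; the proofs are below) =====
def Claim_equal_my_tokenize : Prop := ∀ (line : String), Dom_my_tokenize line → Spec_my_tokenize line (my_tokenize line)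

-- ===== LEMMAS AND PROOFS =====

-- positions of spaces in cs at indices ≥ e, with the index scan shape of A's loop
def posFromIdx (cs : List Char) (e : Nat) : List Int :=
  if e < cs.length then
    (if cs.getD e ' ' == ' ' then [(e : Int)] else []) ++ posFromIdx cs (e + 1)
  else []
termination_by cs.length - e

-- B's enumerate-filter-map over a suffix equals posFromIdx
lemma enum_positions_eq (rest : List Char) :
    ∀ (cs : List Char) (e : Nat), rest = cs.drop e →
      ((PySem.List.enumerate rest (e : Int)).filter (fun q => q.2 == ' ')).map (·.1)
        = posFromIdx cs e := by
  induction rest with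
  | nil =>
    intro cs e h
    rw [posFromIdx]
    have : ¬ e < cs.length := by
      by_contra hlt
      have := List.drop_eq_nil_iff.mp h.symm
      omega
    simp [PySem.List.enumerate, this]
  | cons c rest ih =>
    intro cs e h
    have hlt : e < cs.length := by
      by_contra hge
      have : cs.drop e = [] := List.drop_eq_nil_iff.mpr (by omega)
      rw [this] at h; simp at h
    have hget : cs.getD e ' ' = c := by
      have hg : cs.drop e = c :: rest := h.symm
      have : cs[e] = c := by
        have := List.getElem_drop (xs := cs) (i := e) (j := 0) (h := by simp [hg])
        simp [hg] at this
        exact this.symm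
      simp [List.getD, this, List.getElem?_eq_getElem hlt]
    have htail : rest = cs.drop (e + 1) := by
      have : cs.drop (e + 1) = (cs.drop e).tail := by
        rw [← List.drop_drop]; simp
      rw [this, ← h]; simp
    rw [posFromIdx, if_pos hlt, hget, PySem.List.enumerate_cons]
    have := ih cs (e + 1) htail
    push_cast at this ⊢
    by_cases hc : c = ' ' <;> simp [hc, this]

-- A's loop equals B's fold over posFromIdx, given the loop invariant start ≤ e
lemma loop_eq_fold (cs : List Char) :
    ∀ (n e start : Nat) (array : List String), cs.length - e ≤ n → start ≤ e →
      myTokenizeLoop cs array start e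
        = ((posFromIdx cs e).foldl
            (fun (acc : List String × Int) p =>
              (acc.1 ++ [String.ofList ((cs.drop acc.2.toNat).take (p - acc.2).toNat)], p + 1))
            (array, (start : Int))).1 := by
  intro n
  induction n with
  | zero =>
    intro e start array hn _
    have hge : ¬ e < cs.length := by omega
    rw [myTokenizeLoop, posFromIdx]
    simp [hge]
  | succ n ih =>
    intro e start array hn hse
    rw [myTokenizeLoop, posFromIdx]
    by_cases hlt : e < cs.length
    · simp only [if_pos hlt]
      by_cases hc : cs.getD e ' ' = ' '
      · simp only [hc, beq_self_eq_true, if_true, ne_eq, not_true_eq_false, if_false,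
          List.singleton_append, List.foldl_cons]
        have harg : ((e : Int) - (start : Int)).toNat = e - start := by omega
        have hnext := ih (e + 1) (e + 1) (array ++ [String.ofList ((cs.drop start).take (e - start))]) (by omega) (le_refl _)
        rw [hnext]
        norm_num [harg]
      · simp only [ne_eq, hc, not_false_eq_true, if_true, beq_iff_eq, ]
        exact ih (e + 1) start array (by omega) (by omega)
    · simp [hlt]

-- ===== VERDICT (by name: the statement is the Claim_ definition above) =====
theorem my_tokenize_spec : Claim_equal_my_tokenize := by
  intro line _
  unfold Spec_my_tokenize my_tokenize my_tokenize_alt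
  dsimp only
  rw [show ((0:Int)) = ((0:Nat):Int) by norm_num]
  rw [enum_positions_eq line.toList line.toList 0 (by simp)]
  exact loop_eq_fold line.toList line.toList.length 0 0 [] (by omega) (le_refl 0)
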